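-- pv_equiv track=rewrite | github.com/Coragg/genetic-with-python | main.py | look_for_guanines
-- ===== SOURCE A (Python) =====
-- def look_for_guanines(protein_list: list):
--     """search in the list, if there are three g's row
--     param list data_list
--     return True or false """
--     count: int = 0
--     for type_protein in protein_list:
--         if type_protein == 'g':
--             count += 1
--             if count >= 3:
--                 return False
--         else:
--             count = 0
--     return True
-- ===== SOURCE B (Python) =====
-- def look_for_guanines(protein_list: list):
--     """search in the list, if there are three g's row
--     param list data_list
--     return True or false """
--     return not any(a == b == c == 'g'
--                    for a, b, c in zip(protein_list, protein_list[1:], protein_list[2:]))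
-- ===== Notes on version B (the rewrite author's own statement) =====
-- stated objective: simpler
-- what changed: Replaced the stateful loop with a counter that increments and resets by a stateless scan over overlapping length-3 windows via zip of the list with its two shifted copies.
import Mathlib
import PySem

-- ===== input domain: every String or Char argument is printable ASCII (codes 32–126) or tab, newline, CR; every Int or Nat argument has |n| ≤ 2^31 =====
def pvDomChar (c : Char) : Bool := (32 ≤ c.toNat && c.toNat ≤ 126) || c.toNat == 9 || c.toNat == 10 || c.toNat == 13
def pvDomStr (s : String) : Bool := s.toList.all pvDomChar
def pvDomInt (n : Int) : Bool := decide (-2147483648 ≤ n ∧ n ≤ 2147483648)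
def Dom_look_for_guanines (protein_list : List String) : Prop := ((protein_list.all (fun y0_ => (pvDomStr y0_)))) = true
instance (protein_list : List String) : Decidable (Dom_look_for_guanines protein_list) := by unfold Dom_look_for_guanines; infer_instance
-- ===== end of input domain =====

-- B replaces A's counter-with-reset loop by a stateless any over length-3 windows (zip of the
-- list with its two shifted copies); same return value everywhere, objective: simpler.
-- ===== PORT A =====
-- the loop over protein_list with the running count; returning false inside the loop = early return
def lfgLoop : List String → Nat → Bool
  | [], _ => true
  | x :: xs, count =>
    if x == "g" then
      let count := count + 1
      if count ≥ 3 then false else lfgLoop xs count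
    else lfgLoop xs 0

def look_for_guanines (protein_list : List String) : Bool :=
  lfgLoop protein_list 0

-- ===== PORT B =====
-- Source B's zip(l, l[1:], l[2:]) ported as nested binary zip; 'not any' = !List.any
def look_for_guanines_alt (protein_list : List String) : Bool :=
  !(((protein_list.zip protein_list.tail).zip protein_list.tail.tail).any
      fun p => p.1.1 == p.1.2 && p.1.2 == p.2 && p.2 == "g")

-- ===== PRECONDITION & SPEC =====
def Spec_look_for_guanines (protein_list : List String) (out : Bool) : Prop := out = look_for_guanines_alt protein_list
instance (protein_list : List String) (out : Bool) : Decidable (Spec_look_for_guanines protein_list out) := by unfold Spec_look_for_guanines; infer_instance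

-- ===== CLAIM (what is proved, stated in full; the proofs are below) =====
def Claim_equal_look_for_guanines : Prop := ∀ (protein_list : List String), Dom_look_for_guanines protein_list → Spec_look_for_guanines protein_list (look_for_guanines protein_list)

-- ===== LEMMAS AND PROOFS =====

-- ===== VERDICT (by name: the statement is the Claim_ definition above) =====
-- win l = "l contains three consecutive \"g\"" (the window condition), by structural scan
def win : List String → Bool
  | a :: b :: c :: rest => (a == b && b == c && c == "g") || win (b :: c :: rest)
  | _ => false

lemma alt_eq_win (l : List String) : look_for_guanines_alt l = !win l := by
  fun_induction win l with
  | case1 a b c rest ih =>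
    simp only [look_for_guanines_alt, List.tail, List.zip_cons_cons, List.any_cons] at *
    simp only [Bool.not_or, ih] at *
  | case2 t h =>
    rcases t with _ | ⟨a, _ | ⟨b, _ | ⟨c, r⟩⟩⟩
    · simp [look_for_guanines_alt]
    · simp [look_for_guanines_alt]
    · simp [look_for_guanines_alt]
    · exact absurd rfl (h a b c r)

lemma win_cons_not_g (x : String) (hx : x ≠ "g") (l : List String) :
    win (x :: l) = win l := by
  match l with
  | [] => simp [win]
  | [b] => simp [win]
  | b :: c :: r =>
    simp only [win]
    have : (x == b && b == c && c == "g") = false := by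
      simp only [Bool.and_eq_false_iff, beq_eq_false_iff_ne, ne_eq]
      by_cases h1 : x = b
      · by_cases h2 : b = c
        · right; intro h3; exact hx (h1.trans (h2.trans h3))
        · left; right; exact h2
      · left; left; exact h1
    simp [this]

lemma loop_eq_win (xs : List String) : ∀ c : Nat, c ≤ 2 →
    lfgLoop xs c = !win (List.replicate c "g" ++ xs) := by
  induction xs with
  | nil =>
    intro c hc
    interval_cases c <;> decide
  | cons x rest ih =>
    intro c hc
    by_cases hx : x = "g"
    · subst hx
      by_cases h3 : c + 1 ≥ 3
      · have hc2 : c = 2 := by omega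
        subst hc2
        simp [lfgLoop, win]
      · have : lfgLoop ("g" :: rest) c = lfgLoop rest (c + 1) := by
          simp [lfgLoop, h3]
        rw [this, ih (c + 1) (by omega)]
        congr 1
        rw [List.replicate_succ' , List.append_assoc]
        rfl
    · have : lfgLoop (x :: rest) c = lfgLoop rest 0 := by
        simp [lfgLoop, hx]
      rw [this, ih 0 (by omega)]
      congr 1
      interval_cases c
      · simpa using (win_cons_not_g x hx rest).symm
      · simp only [List.replicate, List.cons_append, List.nil_append]
        rw [show ("g" :: x :: rest) = ("g" :: (x :: rest)) from rfl]
        cases rest with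
        | nil => simp [win]
        | cons b r =>
          simp only [win]
          rw [win_cons_not_g x hx (b :: r)]
          have : ("g" == x) = false := by
            simp only [beq_eq_false_iff_ne]; exact fun h => hx h.symm
          simp [this]
      · simp only [List.replicate, List.cons_append, List.nil_append]
        have hgx : ("g" == x) = false := by
          simp only [beq_eq_false_iff_ne]; exact fun h => hx h.symm
        simp only [win, hgx]
        cases rest with
        | nil => simp [win]
        | cons b r =>
          simp only [win, hgx, Bool.and_false, Bool.false_and, Bool.false_or]
          rw [win_cons_not_g x hx (b :: r)]

theorem look_for_guanines_spec : Claim_equal_look_for_guanines := by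
  intro l _
  show look_for_guanines l = look_for_guanines_alt l
  rw [look_for_guanines, loop_eq_win l 0 (by omega), alt_eq_win]
  rfl
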